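-- pv_equiv track=rewrite | github.com/godkillok/mulitask_textcnn | base_model_v2/cnn_data_process.py | count_word_num
-- ===== SOURCE A (Python) =====
-- def count_word_num(sentence_list):
--     """
--     Count the number of each word in sentences.
--     Args:
--         sentence_list:
--     """
--     word_count = {}
--     author_count = {}
--     category_count = {}
--     keyword_count = {}
--     max_length = 0
--     for sentence in sentence_list:
--         temp_len = len(sentence[0])
--         max_length = max(temp_len, max_length)
--
--         for i in range(temp_len):
--             if sentence[0][i] not in word_count:
--                 word_count[sentence[0][i]] = 1
--             else:
--                 word_count[sentence[0][i]] += 1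
--         if sentence[1] not in author_count:
--             author_count[sentence[1]] = 1
--         else:
--             author_count[sentence[1]] += 1
--
--         for category in sentence[2]:
--             if category not in category_count:
--                 category_count[category] = 1
--             else:
--                 category_count[category] += 1
--
--         for keyword in sentence[3]:
--             if keyword not in keyword_count:
--                 keyword_count[keyword] = 1
--             else:
--                 keyword_count[keyword] += 1
--
--     sorted_words = sorted(word_count.items(), key=lambda x: (-x[1], x[0]))  # 按词出现次数从小到大排序
--     sorted_authors = sorted(author_count.items(), key=lambda x: (-x[1], x[0]))  # 按author出现次数从小到大排序
--     sorted_categorys = sorted(category_count.items(), key=lambda x: (-x[1], x[0]))  # 按category出现次数从小到大排序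
--     sorted_keywords = sorted(keyword_count.items(), key=lambda x: (-x[1], x[0]))  # 按keyword出现次数从小到大排序
--     return sorted_words, sorted_authors, sorted_categorys, sorted_keywords, max_length
-- ===== SOURCE B (Python) =====
-- def _freq(items):
--     # sort-then-scan run-length counting: equal items are adjacent after sorting,
--     # so each maximal run (value, run length) is one frequency entry
--     xs = sorted(items)
--     n = len(xs)
--     runs = []
--     i = 0
--     while i < n:
--         j = i + 1
--         while j < n and xs[j] == xs[i]:
--             j += 1
--         runs.append((xs[i], j - i))
--         i = j
--     runs.sort(key=lambda p: (-p[1], p[0]))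
--     return runs
--
--
-- def count_word_num(sentence_list):
--     words = [w for s in sentence_list for w in s[0]]
--     authors = [s[1] for s in sentence_list]
--     categories = [c for s in sentence_list for c in s[2]]
--     keywords = [k for s in sentence_list for k in s[3]]
--     lens = [len(s[0]) for s in sentence_list]
--     max_length = max(lens) if lens else 0
--     return (_freq(words), _freq(authors), _freq(categories), _freq(keywords),
--             max_length)
-- ===== Notes on version B (the rewrite author's own statement) =====
-- stated objective: alternative
-- what changed: Replaces A's single fused loop that hand-maintains four hash dicts (membership test then set-to-1/increment) by sort-based counting: each stream is flattened, sorted, and scanned once for maximal runs, each run (value, length) being one frequency entry; max_length comes from a separate max() over the lengths.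
import Mathlib
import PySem

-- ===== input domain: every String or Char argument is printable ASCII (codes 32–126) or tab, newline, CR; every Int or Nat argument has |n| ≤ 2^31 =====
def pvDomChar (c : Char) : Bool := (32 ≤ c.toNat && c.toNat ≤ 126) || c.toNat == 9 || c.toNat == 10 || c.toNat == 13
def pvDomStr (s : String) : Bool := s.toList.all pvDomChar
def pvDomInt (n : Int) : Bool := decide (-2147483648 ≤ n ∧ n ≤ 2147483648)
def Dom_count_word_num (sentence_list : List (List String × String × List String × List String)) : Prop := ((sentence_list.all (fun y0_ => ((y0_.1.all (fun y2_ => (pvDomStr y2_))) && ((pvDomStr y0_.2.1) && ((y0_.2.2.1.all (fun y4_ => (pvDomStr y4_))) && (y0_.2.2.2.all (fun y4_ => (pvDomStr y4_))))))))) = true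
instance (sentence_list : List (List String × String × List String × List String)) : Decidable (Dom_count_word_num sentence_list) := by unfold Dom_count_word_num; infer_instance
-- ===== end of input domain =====

-- B replaces A's fused loop over four hash dicts by sort-based counting (sort each
-- stream, scan maximal runs) and a separate max pass; the return value is proved equal.

-- ===== PORT A =====
-- A's repeated `if x not in d: d[x] = 1 else: d[x] += 1` pattern, branches in A's order.
def pyCountStep (d : PySem.Dict String Int) (x : String) : PySem.Dict String Int :=
  if d.contains x = false then d.insert x 1 else d.insert x (d.getD x 0 + 1)

-- A's loop body: one `for sentence in sentence_list` iteration, updating the 5-tuple state.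
def pyBodyA (st : PySem.Dict String Int × PySem.Dict String Int × PySem.Dict String Int × PySem.Dict String Int × Int)
    (sentence : List String × String × List String × List String) :
    PySem.Dict String Int × PySem.Dict String Int × PySem.Dict String Int × PySem.Dict String Int × Int :=
  let tempLen := PySem.List.len sentence.1
  let maxLength := max tempLen st.2.2.2.2
  let wc := (PySem.List.pyRange 0 tempLen).foldl
      (fun wc i => pyCountStep wc (PySem.List.pyGetD sentence.1 i "")) st.1
  let ac := pyCountStep st.2.1 sentence.2.1
  let cc := sentence.2.2.1.foldl pyCountStep st.2.2.1
  let kc := sentence.2.2.2.foldl pyCountStep st.2.2.2.1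
  (wc, ac, cc, kc, maxLength)

def count_word_num (sentence_list : List (List String × String × List String × List String)) : (List (String × Int)) × (List (String × Int)) × (List (String × Int)) × (List (String × Int)) × Int :=
  let st := sentence_list.foldl pyBodyA
    (PySem.Dict.empty, PySem.Dict.empty, PySem.Dict.empty, PySem.Dict.empty, (0 : Int))
  (PySem.List.sorted2 st.1.items (fun x => -x.2) (fun x => x.1),
   PySem.List.sorted2 st.2.1.items (fun x => -x.2) (fun x => x.1),
   PySem.List.sorted2 st.2.2.1.items (fun x => -x.2) (fun x => x.1),
   PySem.List.sorted2 st.2.2.2.1.items (fun x => -x.2) (fun x => x.1),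
   st.2.2.2.2)

-- ===== PORT B =====
-- Source B's inner `while` pair: peel the maximal equal run off the front of the sorted list
-- (j = 1 + length of the leading run of x inside the tail; xs = xs[j:]).
def runsOf : List String → List (String × Int)
  | [] => []
  | x :: t =>
      (x, 1 + ((t.takeWhile (fun y => y == x)).length : Int)) ::
        runsOf (t.dropWhile (fun y => y == x))
termination_by xs => xs.length
decreasing_by
  simpa using Nat.lt_succ_of_le (List.length_dropWhile_le _ _)

-- Source B's _freq: sort, scan runs, sort the (value, count) pairs by (-count, value).
def freqB (items : List String) : List (String × Int) :=
  let xs := PySem.List.sorted items (fun x => x) false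
  PySem.List.sorted2 (runsOf xs) (fun p => -p.2) (fun p => p.1) false

def count_word_num_alt (sentence_list : List (List String × String × List String × List String)) : (List (String × Int)) × (List (String × Int)) × (List (String × Int)) × (List (String × Int)) × Int :=
  let words := sentence_list.flatMap (fun s => s.1)
  let authors := sentence_list.map (fun s => s.2.1)
  let categories := sentence_list.flatMap (fun s => s.2.2.1)
  let keywords := sentence_list.flatMap (fun s => s.2.2.2)
  let lens := sentence_list.map (fun s => PySem.List.len s.1)
  let max_length : Int := if lens.isEmpty then 0 else (PySem.List.max? lens (fun x => x)).getD 0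
  (freqB words, freqB authors, freqB categories, freqB keywords, max_length)

-- ===== PRECONDITION & SPEC =====
def Spec_count_word_num (sentence_list : List (List String × String × List String × List String)) (out : (List (String × Int)) × (List (String × Int)) × (List (String × Int)) × (List (String × Int)) × Int) : Prop := out = count_word_num_alt sentence_list
instance (sentence_list : List (List String × String × List String × List String)) (out : (List (String × Int)) × (List (String × Int)) × (List (String × Int)) × (List (String × Int)) × Int) : Decidable (Spec_count_word_num sentence_list out) := by unfold Spec_count_word_num; infer_instance

-- ===== CLAIM (what is proved, stated in full; the proofs are below) =====
def Claim_equal_count_word_num : Prop := ∀ (sentence_list : List (List String × String × List String × List String)), Dom_count_word_num sentence_list → Spec_count_word_num sentence_list (count_word_num sentence_list)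

-- ===== LEMMAS AND PROOFS =====

-- A's two-branch update is exactly Counter's modify step.
theorem pyCountStep_eq_modify :
    pyCountStep = fun (d : PySem.Dict String Int) (x : String) => d.modify x 0 (· + 1) := by
  funext d x
  unfold pyCountStep PySem.Dict.modify
  cases h : d.contains x with
  | false => rw [PySem.Dict.getD_of_not_contains d 0 h]; simp
  | true => simp

-- A's fused loop splits into the five independent folds.
theorem loopA_split (l : List (List String × String × List String × List String)) :
    ∀ (wc ac cc kc : PySem.Dict String Int) (ml : Int),
    l.foldl pyBodyA (wc, ac, cc, kc, ml) =
      (l.foldl (fun d s => s.1.foldl pyCountStep d) wc,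
       l.foldl (fun d s => pyCountStep d s.2.1) ac,
       l.foldl (fun d s => s.2.2.1.foldl pyCountStep d) cc,
       l.foldl (fun d s => s.2.2.2.foldl pyCountStep d) kc,
       l.foldl (fun m s => max (PySem.List.len s.1) m) ml) := by
  induction l with
  | nil => intro wc ac cc kc ml; rfl
  | cons s t ih =>
    intro wc ac cc kc ml
    rw [List.foldl_cons]
    have hb : pyBodyA (wc, ac, cc, kc, ml) s =
        (s.1.foldl pyCountStep wc, pyCountStep ac s.2.1, s.2.2.1.foldl pyCountStep cc,
         s.2.2.2.foldl pyCountStep kc, max (PySem.List.len s.1) ml) := by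
      simp only [pyBodyA]
      rw [PySem.List.foldl_pyRange_pyGetD s.1 "" pyCountStep wc (le_refl 0)]
      simp
    rw [hb, ih]
    simp

-- the nested counting fold over a projection is Counter of the flattened list
theorem foldl_count_flat (l : List (List String × String × List String × List String))
    (f : (List String × String × List String × List String) → List String) :
    l.foldl (fun d s => (f s).foldl pyCountStep d) PySem.Dict.empty
      = PySem.Dict.counter (l.flatMap f) := by
  rw [PySem.Dict.counter_eq_foldl, List.foldl_flatMap, pyCountStep_eq_modify]

theorem foldl_count_one (l : List (List String × String × List String × List String)) :
    l.foldl (fun d s => pyCountStep d s.2.1) PySem.Dict.empty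
      = PySem.Dict.counter (l.map (fun s => s.2.1)) := by
  rw [PySem.Dict.counter_eq_foldl, List.foldl_map, pyCountStep_eq_modify]

-- the (-count, value) tuple key is the single lexicographic key p ↦ toLex (-p.2, p.1)
theorem before_eq :
    (fun (a b : String × Int) => decide (-a.2 < -b.2) || (!decide (-b.2 < -a.2) && decide (a.1 < b.1)))
      = (fun (a b : String × Int) => decide (toLex ((-a.2 : Int), a.1) < toLex ((-b.2 : Int), b.1))) := by
  funext a b
  by_cases h1 : (-a.2 : Int) < -b.2
  · simp [Prod.Lex.toLex_lt_toLex, h1]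
  · by_cases h2 : (-b.2 : Int) < -a.2
    · simp [Prod.Lex.toLex_lt_toLex, h1, h2, h2.ne']
    · have he : (-a.2 : Int) = -b.2 := le_antisymm (not_lt.1 h2) (not_lt.1 h1)
      simp [Prod.Lex.toLex_lt_toLex, he]

theorem sorted2_eq_sorted_lex (l : List (String × Int)) :
    PySem.List.sorted2 l (fun p => -p.2) (fun p => p.1) false
      = PySem.List.sorted l (fun p => toLex ((-p.2 : Int), p.1)) false := by
  rw [PySem.List.sorted_eq_foldl_insertBy]
  simp only [PySem.List.sorted2]
  rw [before_eq]
  simp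

-- that lexicographic key is injective, so the final sort is permutation-invariant
theorem sorted2_congr_perm (l₁ l₂ : List (String × Int)) (h : l₁.Perm l₂) :
    PySem.List.sorted2 l₁ (fun p => -p.2) (fun p => p.1) false
      = PySem.List.sorted2 l₂ (fun p => -p.2) (fun p => p.1) false := by
  rw [sorted2_eq_sorted_lex, sorted2_eq_sorted_lex]
  refine PySem.List.sorted_eq_sorted_of_perm _ _ _ ?_ h
  intro p q hpq
  have h2 : ((-p.2 : Int), p.1) = ((-q.2 : Int), q.1) := toLex.injective hpq
  have := congrArg Prod.fst h2
  have := congrArg Prod.snd h2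
  cases p; cases q
  simp_all

-- folding Set.add from a state whose head never recurs commutes with the cons
theorem foldl_add_cons (l : List String) (x : String) (hx : x ∉ l) :
    ∀ s : PySem.Set String, l.foldl PySem.Set.add (x :: s) = x :: l.foldl PySem.Set.add s := by
  induction l with
  | nil => intro s; rfl
  | cons y t ih =>
    intro s
    have hxy : (y == x) = false := by
      simp only [beq_eq_false_iff_ne]; intro h; exact hx (by simp [h])
    have hstep : PySem.Set.add (x :: s) y = x :: PySem.Set.add s y := by
      simp only [PySem.Set.add, PySem.Set.contains, List.contains_cons, hxy, Bool.false_or]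
      split <;> rfl
    simp only [List.foldl_cons, hstep]
    exact ih (fun h => hx (List.mem_cons_of_mem _ h)) _

-- dedup of a list starting with a maximal run of x, with no later x
theorem dedup_run (x : String) (tw dw : List String)
    (htw : ∀ y ∈ tw, y = x) (hdw : x ∉ dw) :
    PySem.List.dedup (x :: (tw ++ dw)) = x :: PySem.List.dedup dw := by
  simp only [PySem.List.dedup_eq_ofList, PySem.Set.ofList]
  simp only [List.foldl_cons, List.foldl_append]
  have h1 : PySem.Set.add PySem.Set.empty x = [x] := rfl
  have h2 : tw.foldl PySem.Set.add [x] = [x] := by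
    induction tw with
    | nil => rfl
    | cons y t iht =>
      have hy : y = x := htw y (by simp)
      have : PySem.Set.add [x] y = [x] := by
        simp [PySem.Set.add, PySem.Set.contains, hy]
      simp only [List.foldl_cons, this]
      exact iht (fun z hz => htw z (by simp [hz]))
  rw [h1, h2]
  exact foldl_add_cons dw x hdw []

theorem runsOf_sorted (ys : List String) (h : ys.Pairwise (· ≤ ·)) :
    runsOf ys = (PySem.List.dedup ys).map (fun k => (k, (List.count k ys : Int))) := by
  induction ys using runsOf.induct with
  | case1 => rw [runsOf]; rfl
  | case2 x t ih =>
    rw [runsOf]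
    set tw := t.takeWhile (fun y => y == x) with htw_def
    set dw := t.dropWhile (fun y => y == x) with hdw_def
    have ht : tw ++ dw = t := List.takeWhile_append_dropWhile
    have htw : ∀ y ∈ tw, y = x := fun y hy => by
      have := List.mem_takeWhile_imp hy
      exact eq_of_beq this
    have hxt : ∀ y ∈ t, x ≤ y := (List.pairwise_cons.1 h).1
    have hdsub : dw.Sublist t := List.dropWhile_sublist _
    have hdsorted : dw.Pairwise (· ≤ ·) :=
      ((List.pairwise_cons.1 h).2).sublist hdsub
    have hdw : x ∉ dw := by
      intro hmem
      cases hd : dw with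
      | nil => rw [hd] at hmem; exact absurd hmem (List.not_mem_nil)
      | cons z r =>
        have hz : (z == x) = false := by
          have := List.head?_dropWhile_not (fun y => y == x) t
          rw [← hdw_def, hd] at this
          simpa using this
        have hzx : z ≠ x := by simpa using hz
        have hxz : x ≤ z := hxt z (hdsub.mem (by rw [hd]; simp))
        rw [hd] at hmem
        rcases List.mem_cons.1 hmem with h1 | h1
        · exact hzx h1.symm
        · have hzy : z ≤ x := by
            have := (List.pairwise_cons.1 (hd ▸ hdsorted)).1 x h1
            exact this
          exact hzx (le_antisymm hzy hxz)
    have ihd : runsOf dw = (PySem.List.dedup dw).map (fun k => (k, (List.count k dw : Int))) :=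
      ih hdsorted
    have hcx : List.count x (x :: t) = tw.length + 1 := by
      rw [← ht]
      have htwc : List.count x tw = tw.length :=
        List.count_eq_length.2 (fun b hb => (htw b hb).symm)
      simp [List.count_append, List.count_eq_zero.2 hdw, htwc]
    have hded : PySem.List.dedup (x :: t) = x :: PySem.List.dedup dw := by
      rw [← ht]; exact dedup_run x tw dw htw hdw
    rw [hded, List.map_cons, ihd, hcx]
    congr 1
    · congr 1; push_cast; ring
    · apply List.map_congr_left
      intro k hk
      have hkdw : k ∈ dw := by
        rw [PySem.List.dedup_eq_ofList] at hk
        exact (PySem.Set.mem_ofList dw k).1 hk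
      have hkx : k ≠ x := fun he => hdw (he ▸ hkdw)
      have : List.count k (x :: t) = List.count k dw := by
        rw [← ht]
        simp [List.count_append, Ne.symm hkx,
          List.count_eq_zero.2 (fun hmem => hkx (htw k hmem))]
      rw [this]

-- B's sort-and-scan frequency table is A's Counter table, re-sorted the same way
theorem freqB_eq_counter (L : List String) :
    freqB L = PySem.List.sorted2 (PySem.Dict.counter L).items (fun x => -x.2) (fun x => x.1) false := by
  unfold freqB
  apply sorted2_congr_perm
  have hs : (PySem.List.sorted L (fun x => x) false).Pairwise (· ≤ ·) := by
    simpa using PySem.List.sorted_pairwise L (fun x => x)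
  rw [runsOf_sorted _ hs, PySem.Dict.items_counter]
  have hcnt : ∀ k ∈ PySem.List.dedup (PySem.List.sorted L (fun x => x) false),
      (fun k => (k, (List.count k (PySem.List.sorted L (fun x => x) false) : Int))) k
        = (fun k => (k, (List.count k L : Int))) k := by
    intro k _
    simp [(PySem.List.sorted_perm L (fun x => x) false).count_eq k]
  rw [List.map_congr_left hcnt]
  apply List.Perm.map
  rw [PySem.List.dedup_eq_ofList]
  rw [List.perm_ext_iff_of_nodup (PySem.Set.nodup_ofList _) (PySem.Set.nodup_ofList _)]
  intro a
  simp [PySem.Set.mem_ofList, PySem.List.mem_sorted]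

theorem foldl_max_eq (l : List (List String × String × List String × List String)) :
    ∀ (a : Int), l.foldl (fun m s => max (PySem.List.len s.1) m) a
      = (l.map (fun s => PySem.List.len s.1)).foldl max a := by
  induction l with
  | nil => intro a; rfl
  | cons s t ih =>
    intro a
    simp only [List.foldl_cons, List.map_cons]
    rw [ih, max_comm (PySem.List.len s.1) a]

-- A's running max (seeded with 0) is B's max-of-lengths guarded by emptiness
theorem max_piece_eq (l : List (List String × String × List String × List String)) :
    l.foldl (fun m s => max (PySem.List.len s.1) m) 0
      = (if (l.map (fun s => PySem.List.len s.1)).isEmpty then (0 : Int)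
         else (PySem.List.max? (l.map (fun s => PySem.List.len s.1)) (fun x => x)).getD 0) := by
  cases l with
  | nil => rfl
  | cons s t =>
    simp only [List.map_cons, List.isEmpty_cons, if_neg Bool.false_ne_true,
      PySem.List.max?_id_cons, Option.getD_some, List.foldl_cons]
    rw [foldl_max_eq]
    have h0 : max (PySem.List.len s.1) 0 = PySem.List.len s.1 := by
      simp [PySem.List.len_eq]
    rw [h0]

-- ===== VERDICT (by name: the statement is the Claim_ definition above) =====
theorem count_word_num_spec : Claim_equal_count_word_num := by
  intro sentence_list _
  unfold Spec_count_word_num count_word_num count_word_num_alt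
  simp only [loopA_split, foldl_count_flat, foldl_count_one, freqB_eq_counter, max_piece_eq]
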